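-- pv_equiv track=rewrite | github.com/AP-MI-2021/lab-3-alona77 | main.py | get_longest_all_palindromes
-- ===== SOURCE A (Python) =====
-- def is_palindrome(n):
--     """
--     determina daca un nr este palindrom sau nu
--     """
--     c = n
--     p = 0
--     while n >= 1:
--          p = p * 10 + n % 10
--          n = n // 10
--     if c == p :
--         return True
--     else:
--         return False
--
-- def get_longest_all_palindromes(lst):
--     """
--     determina subsecventa cea mai lunga de palindroame
--     """
--     l = len(lst)
--     result = []
--     for i in range (l):
--         for j in range (i,l):
--             all_palindromes = True
--             for num in lst[i:j+1]:
--                 if is_palindrome(num) == False: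
--                     all_palindromes = False
--                     break
--             if all_palindromes:
--                 if j-i+1 >len(result):
--                     result = lst[i:j+1]
--     return result
-- ===== SOURCE B (Python) =====
-- def is_palindrome(n):
--     c = n
--     p = 0
--     while n >= 1:
--         p = p * 10 + n % 10
--         n = n // 10
--     return c == p
--
-- def get_longest_all_palindromes(lst):
--     """Single pass: grow the current run of consecutive palindromes and keep
--     the first strictly longest run seen."""
--     best = []
--     cur = []
--     for x in lst:
--         if is_palindrome(x):
--             cur = cur + [x]
--             if len(cur) > len(best):
--                 best = cur
--         else:
--             cur = []
--     return best
-- ===== Notes on version B (the rewrite author's own statement) =====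
-- stated objective: faster
-- what changed: Replaced the triple loop over all (i, j) windows (re-scanning each slice for palindromes) by a single left-to-right pass that grows the current run of consecutive palindromes and keeps the first strictly longer run.
import Mathlib
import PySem

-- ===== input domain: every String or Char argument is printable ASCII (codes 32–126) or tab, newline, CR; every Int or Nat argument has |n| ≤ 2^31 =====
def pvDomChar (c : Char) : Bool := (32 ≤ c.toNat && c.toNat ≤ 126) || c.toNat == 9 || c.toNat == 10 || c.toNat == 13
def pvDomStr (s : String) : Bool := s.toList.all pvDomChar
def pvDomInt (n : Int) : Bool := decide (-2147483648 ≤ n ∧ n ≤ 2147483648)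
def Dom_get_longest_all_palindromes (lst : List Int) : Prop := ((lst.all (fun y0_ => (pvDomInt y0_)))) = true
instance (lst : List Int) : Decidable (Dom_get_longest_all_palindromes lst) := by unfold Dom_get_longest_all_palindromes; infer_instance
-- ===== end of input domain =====

-- B replaces A's cubic scan over all (i, j) windows by a single pass that grows the
-- current run of consecutive palindromes and keeps the first strictly longest run.

-- ===== PORT A =====
-- while n >= 1: p = p * 10 + n % 10; n = n // 10   (returns final p)
def palLoop (n p : Int) : Int :=
  if 1 ≤ n then palLoop (PySem.Int.floordiv n 10) (p * 10 + PySem.Int.mod n 10) else p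
termination_by n.toNat
decreasing_by
  rename_i h
  rw [PySem.Int.floordiv_eq_ediv_of_pos (by omega : (0:Int) < 10)]
  omega

def is_palindrome (n : Int) : Bool := n == palLoop n 0

def get_longest_all_palindromes (lst : List Int) : List Int :=
  let l : Int := lst.length
  (PySem.List.pyRange 0 l 1).foldl (fun result i =>
    (PySem.List.pyRange i l 1).foldl (fun result j =>
      let seg := PySem.List.slice lst (some i) (some (j + 1))
      let all_palindromes := seg.foldl (fun b num => b && is_palindrome num) true
      if all_palindromes && decide ((result.length : Int) < j - i + 1) then seg else result)
      result) []

-- ===== PORT B =====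
def get_longest_all_palindromes_alt (lst : List Int) : List Int :=
  (lst.foldl (fun (st : List Int × List Int) x =>
      if is_palindrome x then
        let cur := st.2 ++ [x]
        if st.1.length < cur.length then (cur, cur) else (st.1, cur)
      else (st.1, []))
    ([], [])).1

-- ===== PRECONDITION & SPEC =====
def Spec_get_longest_all_palindromes (lst : List Int) (out : List Int) : Prop := out = get_longest_all_palindromes_alt lst
instance (lst : List Int) (out : List Int) : Decidable (Spec_get_longest_all_palindromes lst out) := by unfold Spec_get_longest_all_palindromes; infer_instance

-- ===== CLAIM (what is proved, stated in full; the proofs are below) =====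
def Claim_equal_get_longest_all_palindromes : Prop := ∀ (lst : List Int), Dom_get_longest_all_palindromes lst → Spec_get_longest_all_palindromes lst (get_longest_all_palindromes lst)

-- ===== LEMMAS AND PROOFS =====

-- keep the longer candidate (A's and B's common update rule)
def upd (r t : List Int) : List Int := if r.length < t.length then t else r

-- A's inner-loop body, named for the proofs (definitionally the lambda in the port)
def Astep (lst : List Int) (i : Int) (result : List Int) (j : Int) : List Int :=
  let seg := PySem.List.slice lst (some i) (some (j + 1))
  let all_palindromes := seg.foldl (fun b num => b && is_palindrome num) true
  if all_palindromes && decide ((result.length : Int) < j - i + 1) then seg else result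

-- B's loop body, named for the proofs (definitionally the lambda in the port)
def bstep (st : List Int × List Int) (x : Int) : List Int × List Int :=
  if is_palindrome x then
    let cur := st.2 ++ [x]
    if st.1.length < cur.length then (cur, cur) else (st.1, cur)
  else (st.1, [])

-- A's outer loop, re-expressed over suffixes
def go : List Int → List Int → List Int
  | [], r => r
  | x :: xs, r => go xs (upd r (List.takeWhile is_palindrome (x :: xs)))

theorem upd_nil (r : List Int) : upd r [] = r := by simp [upd]

theorem foldl_and (p : Int → Bool) (l : List Int) (b : Bool) :
    l.foldl (fun b x => b && p x) b = (b && l.all p) := by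
  induction l generalizing b with
  | nil => simp
  | cons x xs ih => simp [List.foldl_cons, ih, Bool.and_assoc]

theorem take_all_iff (p : Int → Bool) (s : List Int) (k : Nat) (hk : k ≤ s.length) :
    (s.take k).all p = true ↔ k ≤ (s.takeWhile p).length := by
  have h1 : (s.take k).takeWhile p = (s.takeWhile p).take k := Eq.symm List.take_takeWhile
  have hL : (s.takeWhile p).length ≤ s.length := (List.takeWhile_prefix p).length_le
  constructor
  · intro h
    have h2 : (s.take k).takeWhile p = s.take k :=
      List.takeWhile_eq_self_iff.mpr (fun x hx => List.all_eq_true.mp h x hx)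
    have h3 := congrArg List.length h2
    rw [h1] at h3
    simp only [List.length_take] at h3
    omega
  · intro h
    have h2 : (s.takeWhile p).take k <+: s.take k :=
      List.prefix_take_iff.mpr ⟨(List.take_prefix k (s.takeWhile p)).trans (List.takeWhile_prefix p),
        by simp only [List.length_take]; omega⟩
    have h3 : (s.takeWhile p).take k = s.take k :=
      h2.eq_of_length (by simp only [List.length_take]; omega)
    rw [← h1] at h3
    exact List.all_eq_true.mpr (List.takeWhile_eq_self_iff.mp h3)

-- the inner loop over j computes: replace r by the palindromic prefix of the window, if longer
theorem innerLemma (lst : List Int) (i m : Nat) (him : i ≤ m) :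
    m ≤ lst.length → ∀ (r : List Int),
    (PySem.List.pyRange (i : Int) (m : Int) 1).foldl (Astep lst (i : Int)) r
      = upd r (((lst.drop i).take (m - i)).takeWhile is_palindrome) := by
  induction m, him using Nat.le_induction with
  | base =>
    intro _ r
    rw [PySem.List.pyRange_one_eq_nil (le_refl _)]
    simp [upd_nil]
  | succ m him ih =>
    intro hm r
    have hcast : ((m + 1 : Nat) : Int) = (m : Int) + 1 := by push_cast; ring
    rw [hcast, PySem.List.pyRange_one_succ_right (by exact_mod_cast him), List.foldl_append,
      ih (by omega) r]
    -- notation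
    set s := lst.drop i with hs
    have hslen : s.length = lst.length - i := by simp [hs]
    set k := m - i with hk
    have hmk : m + 1 - i = k + 1 := by omega
    have hk1s : k + 1 ≤ s.length := by omega
    set L := (s.takeWhile is_palindrome).length with hL
    have hLle : L ≤ s.length := (List.takeWhile_prefix is_palindrome).length_le
    -- the one extra iteration, at j = m
    show Astep lst (i : Int) (upd r ((s.take (m - i)).takeWhile is_palindrome)) (m : Int)
        = upd r ((s.take (m + 1 - i)).takeWhile is_palindrome)
    rw [hmk, ← hk]
    simp only [Astep]
    have hseg : PySem.List.slice lst (some (i : Int)) (some ((m : Int) + 1))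
        = s.take (k + 1) := by
      rw [← hcast, PySem.List.slice_natCast, hs, hmk]
    rw [hseg, foldl_and]
    have htm : (s.take k).takeWhile is_palindrome = (s.takeWhile is_palindrome).take k :=
      Eq.symm List.take_takeWhile
    have htm1 : (s.take (k + 1)).takeWhile is_palindrome
        = (s.takeWhile is_palindrome).take (k + 1) := Eq.symm List.take_takeWhile
    have hsegl : (s.take (k + 1)).length = k + 1 := by
      simp only [List.length_take]; omega
    by_cases hall : (s.take (k + 1)).all is_palindrome = true
    · have hkL : k + 1 ≤ L := (take_all_iff is_palindrome s (k + 1) hk1s).mp hall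
      have htk1seg : (s.take (k + 1)).takeWhile is_palindrome = s.take (k + 1) := by
        rw [htm1]
        have : (s.takeWhile is_palindrome).take (k + 1) <+: s.take (k + 1) :=
          List.prefix_take_iff.mpr ⟨(List.take_prefix _ _).trans (List.takeWhile_prefix _),
            by simp only [List.length_take]; omega⟩
        exact this.eq_of_length (by simp only [List.length_take]; omega)
      have html : ((s.take k).takeWhile is_palindrome).length = k := by
        rw [htm]; simp only [List.length_take]; omega
      rw [htk1seg]
      by_cases hr : r.length < k + 1
      · have hu : (upd r ((s.take k).takeWhile is_palindrome)).length ≤ k := by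
          unfold upd; split <;> omega
        have hc : ((upd r ((s.take k).takeWhile is_palindrome)).length : Int)
            < (m : Int) - (i : Int) + 1 := by
          have : (k : Int) = (m : Int) - (i : Int) := by omega
          omega
        simp only [hall, Bool.true_and, decide_eq_true_eq]
        rw [if_pos hc]
        unfold upd
        rw [if_pos (by omega)]
      · have hru : upd r ((s.take k).takeWhile is_palindrome) = r := by
          unfold upd; rw [if_neg]; omega
        rw [hru]
        have hc : ¬ ((r.length : Int) < (m : Int) - (i : Int) + 1) := by omega
        simp only [hall, Bool.true_and, decide_eq_true_eq]
        rw [if_neg hc]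
        unfold upd
        rw [if_neg (by omega)]
    · have hkL : ¬ (k + 1 ≤ L) := fun h => hall ((take_all_iff is_palindrome s (k + 1) hk1s).mpr h)
      have heq : (s.take (k + 1)).takeWhile is_palindrome
          = (s.take k).takeWhile is_palindrome := by
        rw [htm, htm1, List.take_of_length_le (by omega), List.take_of_length_le (by omega)]
      rw [Bool.not_eq_true] at hall
      rw [hall, heq]
      simp

theorem outerLemma (lst : List Int) :
    get_longest_all_palindromes lst
      = (List.range lst.length).foldl (fun r i => upd r ((lst.drop i).takeWhile is_palindrome)) [] := by
  show (PySem.List.pyRange 0 (lst.length : Int) 1).foldl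
      (fun result i => (PySem.List.pyRange i (lst.length : Int) 1).foldl (Astep lst i) result) []
    = _
  rw [PySem.List.pyRange_one, List.foldl_map]
  simp only [Int.sub_zero, Int.toNat_natCast, Int.zero_add]
  apply PySem.List.foldl_congr_mem
  intro r i hi
  rw [List.mem_range] at hi
  rw [innerLemma lst i lst.length (by omega) (le_refl _) r,
    List.take_of_length_le (by rw [List.length_drop])]

theorem dropfold (s : List Int) (r : List Int) :
    (List.range s.length).foldl (fun r i => upd r ((s.drop i).takeWhile is_palindrome)) r = go s r := by
  induction s generalizing r with
  | nil => simp [go]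
  | cons x xs ih =>
    simp only [List.length_cons, List.range_succ_eq_map, List.foldl_cons, List.foldl_map,
      List.drop_zero, Nat.succ_eq_add_one, List.drop_succ_cons]
    rw [show go (x :: xs) r = go xs (upd r ((x :: xs).takeWhile is_palindrome)) from rfl]
    exact ih _

theorem upd_collapse (r a b : List Int) (h1 : a.length ≤ b.length)
    (h2 : a.length = b.length → a = b) : upd (upd r a) b = upd r b := by
  unfold upd
  by_cases hra : r.length < a.length
  · rw [if_pos hra]
    by_cases hab : a.length < b.length
    · rw [if_pos hab, if_pos (by omega)]
    · rw [if_neg hab, if_pos (by omega)]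
      exact h2 (by omega)
  · rw [if_neg hra]

theorem go_pal_block (g rest : List Int)
    (hrest : rest.takeWhile is_palindrome = []) :
    ∀ r, g.all is_palindrome = true → go (g ++ rest) r = go rest (upd r g) := by
  induction g with
  | nil => intro r _; simp [upd_nil]
  | cons x g' ih =>
    intro r hg
    simp only [List.all_cons, Bool.and_eq_true] at hg
    obtain ⟨hx, hg'⟩ := hg
    have h1 : List.takeWhile is_palindrome g' = g' :=
      List.takeWhile_eq_self_iff.mpr (fun y hy => List.all_eq_true.mp hg' y hy)
    have htw : List.takeWhile is_palindrome ((x :: g') ++ rest) = x :: g' := by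
      rw [List.cons_append, List.takeWhile_cons_of_pos hx, List.takeWhile_append, h1]
      simp [hrest]
    have hcol : upd (upd r (x :: g')) g' = upd r (x :: g') := by
      unfold upd
      split_ifs with h h2 h2 <;> try rfl
      · exfalso; simp only [List.length_cons] at h2; omega
      · exfalso; simp only [List.length_cons] at h h2; omega
    rw [show go ((x :: g') ++ rest) r
        = go (g' ++ rest) (upd r (List.takeWhile is_palindrome ((x :: g') ++ rest))) from rfl,
      htw, ih (upd r (x :: g')) hg', hcol]

theorem bfold_pal_block (g : List Int) (hg : g.all is_palindrome = true) :
    ∀ best cur, cur.length ≤ best.length →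
    g.foldl bstep (best, cur) = (upd best (cur ++ g), cur ++ g) := by
  induction g with
  | nil =>
    intro best cur hbc
    simp only [List.foldl_nil, List.append_nil]
    rw [show upd best cur = best from by unfold upd; rw [if_neg (by omega)]]
  | cons x g' ih =>
    intro best cur hbc
    simp only [List.all_cons, Bool.and_eq_true] at hg
    obtain ⟨hx, hg'⟩ := hg
    have hstep : bstep (best, cur) x = (upd best (cur ++ [x]), cur ++ [x]) := by
      simp only [bstep, hx, if_pos, upd]
      split <;> rfl
    have hlen1 : (cur ++ [x]).length = cur.length + 1 := by simp
    have hbc' : (cur ++ [x]).length ≤ (upd best (cur ++ [x])).length := by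
      unfold upd; split <;> omega
    have hlen2 : (cur ++ x :: g').length = cur.length + 1 + g'.length := by
      simp only [List.length_append, List.length_cons]; omega
    have hassoc : (cur ++ [x]) ++ g' = cur ++ x :: g' := by simp
    rw [List.foldl_cons, hstep, ih hg' (upd best (cur ++ [x])) (cur ++ [x]) hbc', hassoc]
    have hcol := upd_collapse best (cur ++ [x]) (cur ++ x :: g') (by omega)
      (fun h => by
        have hg0 : g' = [] := List.length_eq_zero_iff.mp (show g'.length = 0 by omega)
        simp [hg0])
    rw [hcol]

theorem mainLemma : ∀ (n : Nat) (s best cur : List Int), s.length ≤ n →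
    (cur = [] ∨ ∃ y ys, s = y :: ys ∧ is_palindrome y = false) →
    (s.foldl bstep (best, cur)).1 = go s best := by
  intro n
  induction n with
  | zero =>
    intro s best cur hn _
    have hs0 : s = [] := by
      cases s with
      | nil => rfl
      | cons a t => simp at hn
    rw [hs0]
    rfl
  | succ n ih =>
    intro s best cur hn H
    cases s with
    | nil => rfl
    | cons y ys =>
      by_cases hy : is_palindrome y = true
      · have hcur : cur = [] := by
          rcases H with h | ⟨y', ys', heq, hpal⟩
          · exact h
          · cases heq; rw [hy] at hpal; cases hpal
        subst hcur
        set g := List.takeWhile is_palindrome (y :: ys) with hgdef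
        set rest := List.dropWhile is_palindrome (y :: ys) with hrestdef
        have hsplit : g ++ rest = y :: ys := List.takeWhile_append_dropWhile
        have hg : g.all is_palindrome = true := List.all_takeWhile
        have hglen : 1 ≤ g.length := by
          rw [hgdef, List.takeWhile_cons_of_pos hy]; simp
        have hrtw : rest.takeWhile is_palindrome = [] := by
          cases hr : rest with
          | nil => rfl
          | cons z zs =>
            have hz : is_palindrome z = false := by
              have h0 : List.dropWhile is_palindrome (y :: ys) = z :: zs := hrestdef.symm.trans hr
              have hne : List.dropWhile is_palindrome (y :: ys) ≠ [] := by rw [h0]; simp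
              have hhd := List.head_dropWhile_not is_palindrome (l := y :: ys) hne
              simp only [h0, List.head_cons] at hhd
              exact hhd
            rw [List.takeWhile_cons_of_neg (by simp [hz])]
        rw [← hsplit, List.foldl_append,
          bfold_pal_block g hg best [] (by simp),
          go_pal_block g rest hrtw best hg]
        simp only [List.nil_append]
        have hrestlen : rest.length ≤ n := by
          have hlen := congrArg List.length hsplit
          simp only [List.length_append, List.length_cons] at hlen
          simp only [List.length_cons] at hn
          omega
        cases hr : rest with
        | nil => rfl
        | cons z zs =>
          have hz : is_palindrome z = false := by
            have h0 : List.dropWhile is_palindrome (y :: ys) = z :: zs := hrestdef.symm.trans hr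
            have hne : List.dropWhile is_palindrome (y :: ys) ≠ [] := by rw [h0]; simp
            have hhd := List.head_dropWhile_not is_palindrome (l := y :: ys) hne
            simp only [h0, List.head_cons] at hhd
            exact hhd
          exact ih (z :: zs) (upd best g) g (by rw [← hr]; omega) (Or.inr ⟨z, zs, rfl, hz⟩)
      · rw [Bool.not_eq_true] at hy
        have hstep : bstep (best, cur) y = (best, []) := by
          simp [bstep, hy]
        rw [List.foldl_cons, hstep,
          show go (y :: ys) best
            = go ys (upd best (List.takeWhile is_palindrome (y :: ys))) from rfl,
          List.takeWhile_cons_of_neg (by simp [hy]), upd_nil]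
        exact ih ys best [] (by simp at hn; omega) (Or.inl rfl)

-- ===== VERDICT (by name: the statement is the Claim_ definition above) =====
theorem get_longest_all_palindromes_spec : Claim_equal_get_longest_all_palindromes := by
  intro lst _
  unfold Spec_get_longest_all_palindromes
  have hB : get_longest_all_palindromes_alt lst = (lst.foldl bstep ([], [])).1 := rfl
  rw [outerLemma, dropfold, hB, mainLemma lst.length lst [] [] (le_refl _) (Or.inl rfl)]
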